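-- pv_equiv track=rewrite | github.com/dlwocks/EE | learningfunc.py | _thetalen
-- ===== SOURCE A (Python) =====
-- def _thetalen(layernum):
--     total = 0
--     partiallen = [0]
--     temp = None
--     for l in layernum:
--         if l <= 0 or not isinstance(l, int):
--             raise RuntimeError('a layernum is not an positive integer')
--         if temp:
--             total += (temp + 1) * l
--             partiallen.append(total)
--         temp = l
--     return partiallen
-- ===== SOURCE B (Python) =====
-- def _thetalen(layernum):
--     for l in layernum:
--         if l <= 0 or not isinstance(l, int):
--             raise RuntimeError('a layernum is not an positive integer')
--     weights = [(a + 1) * b for a, b in zip(layernum, layernum[1:])]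
--     cur = sum(weights)
--     out = []
--     for w in reversed(weights):
--         out.append(cur)
--         cur -= w
--     out.append(cur)
--     out.reverse()
--     return out
-- ===== Notes on version B (the rewrite author's own statement) =====
-- stated objective: alternative
-- what changed: Instead of A's forward loop carrying total/partiallen/temp, B validates, computes the grand total of the inter-layer weight counts once, then builds the list BACK-TO-FRONT by subtracting each weight count from the total, reversing at the end.
import Mathlib
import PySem

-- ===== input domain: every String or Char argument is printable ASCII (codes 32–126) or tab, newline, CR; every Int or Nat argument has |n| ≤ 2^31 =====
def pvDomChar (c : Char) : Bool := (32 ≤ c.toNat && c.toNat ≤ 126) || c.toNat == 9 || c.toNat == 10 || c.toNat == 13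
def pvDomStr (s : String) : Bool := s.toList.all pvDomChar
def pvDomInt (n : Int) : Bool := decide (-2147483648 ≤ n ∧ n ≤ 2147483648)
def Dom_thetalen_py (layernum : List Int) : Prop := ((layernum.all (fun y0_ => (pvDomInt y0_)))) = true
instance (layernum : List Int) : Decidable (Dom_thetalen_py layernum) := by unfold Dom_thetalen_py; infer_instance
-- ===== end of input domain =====

-- B computes the grand total once and builds the list back-to-front by subtraction; alternative decomposition, same cost.

-- ===== PORT A =====
-- one step of A's loop body; state = (total, partiallen, temp)
def thetalenStepA (st : Int × List Int × Option Int) (l : Int) : Int × List Int × Option Int :=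
  match st with
  | (total, partiallen, temp) =>
    -- `if temp:` — truthy iff temp is a nonzero int (None is falsy)
    match temp with
    | some t =>
      if t ≠ 0 then
        (total + (t + 1) * l, partiallen ++ [total + (t + 1) * l], some l)
      else
        (total, partiallen, some l)
    | none => (total, partiallen, some l)

def thetalen_py (layernum : List Int) : List Int :=
  -- the `raise RuntimeError` branch is excluded by Pre_thetalen_py (some l ≤ 0)
  (layernum.foldl thetalenStepA (0, [0], none)).2.1

-- ===== PORT B =====
-- Source B's backward loop body; state = (cur, out)
def thetalenStepB (st : Int × List Int) (w : Int) : Int × List Int :=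
  (st.1 - w, st.2 ++ [st.1])

def thetalen_py_alt (layernum : List Int) : List Int :=
  -- Source B's validation loop raises exactly where A does; excluded by Pre_thetalen_py
  let weights := (layernum.zip layernum.tail).map (fun p => (p.1 + 1) * p.2)
  let st := weights.reverse.foldl thetalenStepB (weights.sum, [])
  (st.2 ++ [st.1]).reverse

-- ===== PRECONDITION & SPEC =====
-- A raises RuntimeError when some element is ≤ 0; Pre_ admits exactly the inputs where A returns.
def Pre_thetalen_py (layernum : List Int) : Prop := ∀ x ∈ layernum, 0 < x
instance (layernum : List Int) : Decidable (Pre_thetalen_py layernum) := by unfold Pre_thetalen_py; infer_instance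
def pvWitness_thetalen_py : List Int := ([3, 4, 2])

def Spec_thetalen_py (layernum : List Int) (out : List Int) : Prop := out = thetalen_py_alt layernum
instance (layernum : List Int) (out : List Int) : Decidable (Spec_thetalen_py layernum out) := by unfold Spec_thetalen_py; infer_instance

-- ===== CLAIM (what is proved, stated in full; the proofs are below) =====
def Claim_equal_thetalen_py : Prop := ∀ (layernum : List Int), Dom_thetalen_py layernum → Pre_thetalen_py layernum → Spec_thetalen_py layernum (thetalen_py layernum)

-- ===== LEMMAS AND PROOFS =====

-- scanl always starts with its initial accumulator
lemma scanl_head_tail (b : Int) (l : List Int) :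
    List.scanl (· + ·) b l = b :: (List.scanl (· + ·) b l).tail := by
  cases l <;> simp [List.scanl_cons]

-- A's loop invariant: the fold extends acc with the prefix sums (tail of scanl) of the
-- consecutive-pair products of (t :: l), shifted by total
lemma thetalen_auxA (l : List Int) (hp : ∀ x ∈ l, 0 < x) :
    ∀ (t total : Int) (acc : List Int), 0 < t →
      (l.foldl thetalenStepA (total, acc, some t)).2.1 =
        acc ++ ((((t :: l).zip l).map (fun p => (p.1 + 1) * p.2)).scanl (· + ·) total).tail := by
  induction l with
  | nil => intro t total acc _; simp
  | cons x xs ih =>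
    intro t total acc ht
    have hx : 0 < x := hp x (by simp)
    have hxs : ∀ y ∈ xs, 0 < y := fun y hy => hp y (by simp [hy])
    have hstep : thetalenStepA (total, acc, some t) x =
        (total + (t + 1) * x, acc ++ [total + (t + 1) * x], some x) := by
      simp [thetalenStepA, ht.ne']
    simp only [List.foldl_cons, hstep]
    rw [ih hxs x (total + (t + 1) * x) (acc ++ [total + (t + 1) * x]) hx]
    rw [List.zip_cons_cons, List.map_cons, List.scanl_cons, List.tail_cons,
        scanl_head_tail]
    simp

-- B's backward loop invariant: folding over xs.reverse leaves c - sum and the reversed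
-- tail of the prefix sums starting at c - sum
lemma thetalen_auxB (xs : List Int) :
    ∀ (c : Int) (out0 : List Int),
      xs.reverse.foldl thetalenStepB (c, out0) =
        (c - xs.sum, out0 ++ ((xs.scanl (· + ·) (c - xs.sum)).tail).reverse) := by
  induction xs with
  | nil => intro c out0; simp
  | cons x t ih =>
    intro c out0
    rw [List.reverse_cons, List.foldl_append, ih c out0]
    simp only [List.foldl_cons, List.foldl_nil, thetalenStepB, List.sum_cons]
    have h1 : c - (x + t.sum) + x = c - t.sum := by ring
    rw [List.scanl_cons, List.tail_cons, h1, Prod.mk.injEq]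
    refine ⟨by ring, ?_⟩
    rw [scanl_head_tail (c - t.sum) t]
    simp

theorem thetalen_py_spec : Claim_equal_thetalen_py := by
  intro layernum _ hpre
  unfold Spec_thetalen_py thetalen_py thetalen_py_alt
  -- B's side reduces to the forward prefix-sum list
  set ws := (layernum.zip layernum.tail).map (fun p => (p.1 + 1) * p.2) with hws
  show (layernum.foldl thetalenStepA (0, [0], none)).2.1 =
      ((ws.reverse.foldl thetalenStepB (ws.sum, [])).2
        ++ [(ws.reverse.foldl thetalenStepB (ws.sum, [])).1]).reverse
  rw [thetalen_auxB ws ws.sum []]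
  simp only [sub_self, List.nil_append]
  rw [List.reverse_append, List.reverse_reverse]
  simp only [List.reverse_singleton, List.singleton_append]
  rw [← scanl_head_tail 0 ws]
  -- A's side reduces to the same list
  cases layernum with
  | nil => rfl
  | cons x xs =>
    have hx : 0 < x := hpre x (by simp)
    have hxs : ∀ y ∈ xs, 0 < y := fun y hy => hpre y (by simp [hy])
    have hstep : thetalenStepA (0, [0], none) x = (0, [0], some x) := by
      simp [thetalenStepA]
    simp only [List.foldl_cons, hstep]
    rw [thetalen_auxA xs hxs x 0 [0] hx]
    simp only [hws, List.tail_cons]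
    rw [scanl_head_tail]
    simp
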